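-- pv_equiv track=rewrite | github.com/PoojaYuvaraj/Visual-Crytography | kofk.py | makePiSigma
-- ===== SOURCE A (Python) =====
-- import itertools
--
-- def makePiSigma (W):
--    pi = []
--    sigma = []
--    for i in range(0, len(W)+1):
--       listing = [list(subset) for subset in itertools.combinations(W, i)]
--       if (len(listing)%2 == 0):
--          pi.extend(listing)
--       else:
--          sigma.extend(listing)
--    #pi[0] =[0]
--    return([pi, sigma])
-- ===== SOURCE B (Python) =====
-- def _pascal_step(x, groups):
--     # groups[i] = all size-i subsets of the suffix already processed, in
--     # combinations order; Pascal recurrence: new[i] = ([x]+each of old[i-1]) + old[i]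
--     out = [groups[0]]
--     prev = groups[0]
--     for g in groups[1:]:
--         out.append([[x] + s for s in prev] + g)
--         prev = g
--     out.append([[x] + s for s in prev])
--     return out
--
-- def makePiSigma(W):
--     # Build the whole powerset grouped by size with a Pascal-triangle DP over
--     # the elements (no itertools, no per-size combination generation).
--     groups = [[[]]]
--     for x in reversed(W):
--         groups = _pascal_step(x, groups)
--     pi, sigma = [], []
--     for g in groups:
--         if len(g) % 2 == 0:
--             pi.extend(g)
--         else:
--             sigma.extend(g)
--     return [pi, sigma]
-- ===== Notes on version B (the rewrite author's own statement) =====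
-- stated objective: alternative
-- what changed: B abandons itertools.combinations entirely: it builds the powerset grouped by subset size with a Pascal-triangle dynamic program over the elements (each step merges the previous element's size-groups by new[i] = lift(old[i-1]) + old[i]), then splits the finished groups by length parity, instead of A's loop that generates each size's combinations from scratch.
import Mathlib
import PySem

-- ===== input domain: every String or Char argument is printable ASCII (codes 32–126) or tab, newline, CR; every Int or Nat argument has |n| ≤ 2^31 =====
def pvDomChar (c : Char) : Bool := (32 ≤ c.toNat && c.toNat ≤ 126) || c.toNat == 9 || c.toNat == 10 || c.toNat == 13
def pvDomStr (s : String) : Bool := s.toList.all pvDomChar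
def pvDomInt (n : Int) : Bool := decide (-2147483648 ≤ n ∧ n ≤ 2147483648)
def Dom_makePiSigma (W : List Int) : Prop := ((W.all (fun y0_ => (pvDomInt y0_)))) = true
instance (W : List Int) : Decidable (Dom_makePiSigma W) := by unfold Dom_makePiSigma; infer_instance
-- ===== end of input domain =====

-- B replaces per-size itertools.combinations generation by a Pascal-triangle DP over the
-- elements that builds the powerset grouped by size; same cost (objective: alternative).

-- ===== PORT A =====
-- hand port of itertools.combinations(W, i) (lexicographic by index)
def combos (xs : List Int) (k : Nat) : List (List Int) :=
  match k, xs with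
  | 0, _ => [[]]
  | _ + 1, [] => []
  | k + 1, x :: rest => (combos rest k).map (fun s => x :: s) ++ combos rest (k + 1)

def makePiSigma (W : List Int) : List (List (List Int)) :=
  let step : (List (List Int) × List (List Int)) → Nat → (List (List Int) × List (List Int)) :=
    fun ps i =>
      let listing := combos W i
      if listing.length % 2 == 0 then (ps.1 ++ listing, ps.2) else (ps.1, ps.2 ++ listing)
  let r := (List.range (W.length + 1)).foldl step ([], [])
  [r.1, r.2]

-- ===== PORT B =====
-- port of Source B's _pascal_step inner loop (prev carried through the tail of groups)
def pascalAux (x : Int) (prev : List (List Int)) : List (List (List Int)) → List (List (List Int))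
  | [] => [prev.map (fun s => x :: s)]
  | g :: rest => (prev.map (fun s => x :: s) ++ g) :: pascalAux x g rest

-- Source B's _pascal_step; its groups argument is always nonempty (the [] case is unreachable)
def pascalStep (x : Int) (groups : List (List (List Int))) : List (List (List Int)) :=
  match groups with
  | [] => []
  | g0 :: rest => g0 :: pascalAux x g0 rest

def makePiSigma_alt (W : List Int) : List (List (List Int)) :=
  let groups := W.foldr pascalStep [[[]]]   -- 'for x in reversed(W)' = foldr
  let r := groups.foldl
    (fun (ps : List (List Int) × List (List Int)) g =>
      if g.length % 2 == 0 then (ps.1 ++ g, ps.2) else (ps.1, ps.2 ++ g))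
    ([], [])
  [r.1, r.2]

-- ===== PRECONDITION & SPEC =====
def Spec_makePiSigma (W : List Int) (out : List (List (List Int))) : Prop := out = makePiSigma_alt W
instance (W : List Int) (out : List (List (List Int))) : Decidable (Spec_makePiSigma W out) := by unfold Spec_makePiSigma; infer_instance

-- ===== CLAIM =====
def Claim_equal_makePiSigma : Prop := ∀ (W : List Int), Dom_makePiSigma W → Spec_makePiSigma W (makePiSigma W)

-- ===== LEMMAS AND PROOFS =====

theorem combos_eq_nil_of_lt (xs : List Int) (k : Nat) (h : xs.length < k) :
    combos xs k = [] := by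
  induction xs generalizing k with
  | nil => cases k with
    | zero => omega
    | succ k => simp [combos]
  | cons x rest ih =>
    cases k with
    | zero => omega
    | succ k =>
      simp at h
      simp [combos, ih k (by omega), ih (k + 1) (by omega)]

theorem pascal_aux_range (x : Int) (rest : List Int) (m : Nat) :
    ∀ (k : Nat), k + m = rest.length →
    pascalAux x (combos rest k) ((List.range' (k + 1) m).map (fun i => combos rest i))
      = (List.range' (k + 1) (m + 1)).map (fun i => combos (x :: rest) i) := by
  induction m with
  | zero =>
    intro k hk
    simp [pascalAux, combos, combos_eq_nil_of_lt rest (k + 1) (by omega)]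
  | succ m ih =>
    intro k hk
    rw [List.range'_succ, List.map_cons, pascalAux, List.range'_succ, List.map_cons]
    refine congrArg₂ List.cons ?_ ?_
    · simp [combos]
    · simpa using ih (k + 1) (by omega)

theorem foldr_pascal (W : List Int) :
    W.foldr pascalStep [[[]]]
      = (List.range (W.length + 1)).map (fun i => combos W i) := by
  induction W with
  | nil => simp [combos]
  | cons x rest ih =>
    rw [List.foldr_cons, ih]
    have h1 : List.range (rest.length + 1) = 0 :: List.range' 1 rest.length := by
      rw [List.range_eq_range', List.range'_succ]
    have h2 : List.range (rest.length + 1 + 1) = 0 :: List.range' 1 (rest.length + 1) := by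
      rw [List.range_eq_range', List.range'_succ]
    simp only [List.length_cons]
    rw [h1, h2, List.map_cons, List.map_cons, pascalStep]
    refine congrArg₂ List.cons ?_ ?_
    · simp [combos]
    · simpa [combos] using pascal_aux_range x rest rest.length 0 (by omega)

theorem makePiSigma_eq (W : List Int) : makePiSigma W = makePiSigma_alt W := by
  simp only [makePiSigma, makePiSigma_alt, foldr_pascal, List.foldl_map]

-- ===== VERDICT =====
theorem makePiSigma_spec : Claim_equal_makePiSigma := by
  intro W _
  unfold Spec_makePiSigma
  exact makePiSigma_eq W
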